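-- pv_equiv track=rewrite | github.com/okqsna/word-embeddings-la | scripts/data_preprocessing.py | is_probable_transliteration
-- ===== SOURCE A (Python) =====
-- def is_probable_transliteration(english_word: str, transliterations: set[str]) -> bool:
--     """
--     Function checks whether an English word is probably only a transliteration
--     of a Ukrainian word. Helps catch cases where transliteration systems produce slightly
--     different spellings.
--
--     :param english_word: English word from the dictionary
--     :param transliterations: possible transliteration variants of the Ukrainian word
--     :return: True if the English word looks like transliteration, otherwise False
--     """
--     english_word = english_word.lower()
--
--     if english_word in transliterations:
--         return True
--
--     for variant in transliterations:
--         variant = variant.lower()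
--
--         if english_word == variant:
--             return True
--
--         if len(english_word) >= 4 and len(variant) >= 4:
--             if english_word.startswith(variant[:4]) or variant.startswith(english_word[:4]):
--                 return True
--
--     return False
-- ===== SOURCE B (Python) =====
-- def is_probable_transliteration(english_word: str, transliterations: set[str]) -> bool:
--     # Canonicalization: two words "match" under A's rule exactly when their
--     # canonical keys coincide, where key(w) = lower(w)[:4] if len >= 4 else lower(w).
--     def key(w: str) -> str:
--         w = w.lower()
--         return w[:4] if len(w) >= 4 else w
--     return key(english_word) in {key(v) for v in transliterations}
-- ===== Notes on version B (the rewrite author's own statement) =====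
-- stated objective: simpler
-- what changed: Replaces A's two-stage logic (raw membership test plus a scanning loop with equality and two-directional startswith tests) by a single canonicalization: key(w) = lower(w)[:4] if len>=4 else lower(w); two words match under A's rule iff their keys coincide, so B is one set-comprehension and one membership lookup with no case analysis at query time.
import Mathlib
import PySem

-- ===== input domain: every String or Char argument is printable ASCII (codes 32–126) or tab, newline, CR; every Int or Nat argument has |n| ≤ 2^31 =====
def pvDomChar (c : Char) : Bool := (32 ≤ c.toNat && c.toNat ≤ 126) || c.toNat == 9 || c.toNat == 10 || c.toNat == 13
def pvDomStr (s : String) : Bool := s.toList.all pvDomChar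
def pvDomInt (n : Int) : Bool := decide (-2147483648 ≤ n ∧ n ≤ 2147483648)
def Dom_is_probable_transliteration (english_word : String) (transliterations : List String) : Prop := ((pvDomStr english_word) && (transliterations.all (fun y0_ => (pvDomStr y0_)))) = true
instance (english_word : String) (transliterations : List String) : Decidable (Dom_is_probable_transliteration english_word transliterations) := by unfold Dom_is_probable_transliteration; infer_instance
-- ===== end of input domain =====

-- B collapses A's two-stage test (raw membership + scanning loop with equality and
-- two-directional startswith checks) into one canonical key — lower(w)[:4] if len >= 4
-- else lower(w) — and a single set-membership lookup (objective: simpler).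


-- ===== PORT A =====
-- the 'for variant in transliterations' loop with its early returns
def pvALoop (e : List Char) : List String → Bool
  | [] => false
  | t :: rest =>
    let v := PySem.Chars.lower t.toList
    if e = v then true
    else if 4 ≤ PySem.Chars.len e ∧ 4 ≤ PySem.Chars.len v then
      if PySem.Chars.startswith e (PySem.List.slice v none (some 4))
         || PySem.Chars.startswith v (PySem.List.slice e none (some 4)) then true
      else pvALoop e rest
    else pvALoop e rest

def is_probable_transliteration (english_word : String) (transliterations : List String) : Bool :=
  let e := PySem.Chars.lower english_word.toList
  if (transliterations.map String.toList).contains e then true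
  else pvALoop e transliterations

-- ===== PORT B =====
-- the inner helper 'key' of Source B: lower, then truncate to 4 chars when long enough
def pvKey (w : List Char) : List Char :=
  let l := PySem.Chars.lower w
  if 4 ≤ PySem.Chars.len l then PySem.List.slice l none (some 4) else l

def is_probable_transliteration_alt (english_word : String) (transliterations : List String) : Bool :=
  PySem.Set.contains
    (PySem.Set.ofList (transliterations.map (fun v => pvKey v.toList)))
    (pvKey english_word.toList)

-- ===== PRECONDITION & SPEC =====
def Spec_is_probable_transliteration (english_word : String) (transliterations : List String) (out : Bool) : Prop := out = is_probable_transliteration_alt english_word transliterations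
instance (english_word : String) (transliterations : List String) (out : Bool) : Decidable (Spec_is_probable_transliteration english_word transliterations out) := by unfold Spec_is_probable_transliteration; infer_instance

-- ===== CLAIM (what is proved, stated in full; the proofs are below) =====
def Claim_equal_is_probable_transliteration : Prop := ∀ (english_word : String) (transliterations : List String), Dom_is_probable_transliteration english_word transliterations → Spec_is_probable_transliteration english_word transliterations (is_probable_transliteration english_word transliterations)

-- ===== LEMMAS AND PROOFS =====

theorem lowerChar_idem (c : Char) : PySem.Chars.lowerChar (PySem.Chars.lowerChar c) = PySem.Chars.lowerChar c := by
  have hle : ∀ a b : Char, (a ≤ b) ↔ a.toNat ≤ b.toNat := by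
    intro a b; rw [Char.le_def]; constructor <;> intro h <;> exact_mod_cast h
  have h65 : 'A'.toNat = 65 := rfl
  have h90 : 'Z'.toNat = 90 := rfl
  simp only [PySem.Chars.lowerChar, PySem.Chars.isupper]
  by_cases h1 : 'A' ≤ c
  · by_cases h2 : c ≤ 'Z'
    · have hA := (hle _ _).mp h1
      have hZ := (hle _ _).mp h2
      have hval : (c.toNat + 32).isValidChar := by left; omega
      have hv : (Char.ofNat (c.toNat + 32)).toNat = c.toNat + 32 := by
        rw [Char.toNat_ofNat, if_pos hval]
      have hnot : ¬ (Char.ofNat (c.toNat + 32) ≤ 'Z') := by rw [hle, hv]; omega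
      simp only [h1, h2, decide_true, Bool.and_self, if_true]
      simp [hnot]
    · simp [h2]
  · simp [h1]

theorem lower_idem (l : List Char) : PySem.Chars.lower (PySem.Chars.lower l) = PySem.Chars.lower l := by
  simp [PySem.Chars.lower, Function.comp, lowerChar_idem]

-- pvKey computed on an already-lowered list, expressed with List.take
theorem pvKey_lowered (l : List Char) (h : PySem.Chars.lower l = l) :
    pvKey l = if 4 ≤ l.length then l.take 4 else l := by
  simp only [pvKey, h]
  by_cases h4 : 4 ≤ l.length
  · rw [if_pos (by simpa [PySem.Chars.len_eq] using h4), if_pos h4,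
      PySem.List.slice_to (b := (4:Int)) l (by norm_num)]
    congr 1
  · rw [if_neg (by simpa [PySem.Chars.len_eq] using h4), if_neg h4]

-- the symmetric startswith pair on two length-≥-4 words is 4-prefix equality
theorem prefix4_iff (e v : List Char) (he : 4 ≤ e.length) (hv : 4 ≤ v.length) :
    (v.take 4 <+: e ∨ e.take 4 <+: v) ↔ e.take 4 = v.take 4 := by
  have lv : (v.take 4).length = 4 := by simp [hv]
  have le : (e.take 4).length = 4 := by simp [he]
  rw [List.prefix_iff_eq_take, List.prefix_iff_eq_take, lv, le]
  constructor
  · rintro (h | h) <;> simp [h]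
  · intro h; left; exact h.symm

-- the canonicalization lemma: keys of two (lowered) words coincide exactly when
-- A's matching rule relates them
theorem key_eq_iff (e v : List Char) (he : PySem.Chars.lower e = e) (hv : PySem.Chars.lower v = v) :
    pvKey e = pvKey v ↔ (e = v ∨ (4 ≤ e.length ∧ 4 ≤ v.length ∧ e.take 4 = v.take 4)) := by
  rw [pvKey_lowered e he, pvKey_lowered v hv]
  by_cases h1 : 4 ≤ e.length <;> by_cases h2 : 4 ≤ v.length
  · simp only [if_pos h1, if_pos h2]
    constructor
    · intro h; exact Or.inr ⟨h1, h2, h⟩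
    · rintro (rfl | ⟨-, -, h⟩)
      · rfl
      · exact h
  · simp only [if_pos h1, if_neg h2]
    constructor
    · intro h
      have : (e.take 4).length = v.length := by rw [h]
      rw [List.length_take] at this; omega
    · rintro (rfl | ⟨_, h, _⟩) <;> omega
  · simp only [if_neg h1, if_pos h2]
    constructor
    · intro h
      have : e.length = (v.take 4).length := by rw [h]
      rw [List.length_take] at this; omega
    · rintro (rfl | ⟨h, _, _⟩) <;> omega
  · simp only [if_neg h1, if_neg h2]
    constructor
    · intro h; exact Or.inl h
    · rintro (rfl | ⟨h, _, _⟩) <;> first | rfl | omega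

theorem pvALoop_true_iff (e : List Char) (ts : List String) :
    pvALoop e ts = true ↔ ∃ t ∈ ts,
      (e = PySem.Chars.lower t.toList ∨
       (4 ≤ e.length ∧ 4 ≤ (PySem.Chars.lower t.toList).length ∧
        e.take 4 = (PySem.Chars.lower t.toList).take 4)) := by
  induction ts with
  | nil => simp [pvALoop]
  | cons t rest ih =>
    set v := PySem.Chars.lower t.toList with hv
    by_cases h1 : e = v
    · simp [pvALoop, ← hv, h1]
    · by_cases h2 : 4 ≤ PySem.Chars.len e ∧ 4 ≤ PySem.Chars.len v
      · have he : 4 ≤ e.length := by simpa [PySem.Chars.len_eq] using h2.1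
        have hlv : 4 ≤ v.length := by simpa [PySem.Chars.len_eq] using h2.2
        by_cases h3 : (PySem.Chars.startswith e (PySem.List.slice v none (some 4))
            || PySem.Chars.startswith v (PySem.List.slice e none (some 4))) = true
        · have hpre : e.take 4 = v.take 4 := by
            rw [← prefix4_iff e v he hlv]
            rcases Bool.or_eq_true_iff.mp h3 with h | h
            · left
              have := (PySem.Chars.startswith_iff _ _).mp h
              simpa [PySem.List.slice_to (b := (4:Int)) v (by norm_num)] using this
            · right
              have := (PySem.Chars.startswith_iff _ _).mp h
              simpa [PySem.List.slice_to (b := (4:Int)) e (by norm_num)] using this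
          simp only [pvALoop, ← hv, if_neg h1, if_pos h2, if_pos h3, true_iff]
          exact ⟨t, by simp, Or.inr ⟨he, hlv, hpre⟩⟩
        · have hnpre : ¬ e.take 4 = v.take 4 := by
            intro hpre
            apply h3
            rw [Bool.or_eq_true_iff]
            left
            rw [PySem.Chars.startswith_iff,
              PySem.List.slice_to (b := (4:Int)) v (by norm_num)]
            have h4n : ((4:Int)).toNat = 4 := rfl
            rw [h4n, ← hpre]
            exact List.take_prefix 4 e
          simp only [pvALoop, ← hv, if_neg h1, if_pos h2, if_neg h3, ih]
          constructor
          · rintro ⟨u, hu, hc⟩; exact ⟨u, by simp [hu], hc⟩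
          · rintro ⟨u, hu, hc⟩
            rcases List.mem_cons.mp hu with rfl | hu
            · rcases hc with hc | hc
              · exact absurd hc h1
              · exact absurd hc.2.2 hnpre
            · exact ⟨u, hu, hc⟩
      · have hn : ¬ (4 ≤ e.length ∧ 4 ≤ v.length) := by
          simpa [PySem.Chars.len_eq] using h2
        simp only [pvALoop, ← hv, if_neg h1, if_neg h2, ih]
        constructor
        · rintro ⟨u, hu, hc⟩; exact ⟨u, by simp [hu], hc⟩
        · rintro ⟨u, hu, hc⟩
          rcases List.mem_cons.mp hu with rfl | hu
          · rcases hc with hc | hc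
            · exact absurd hc h1
            · exact absurd ⟨hc.1, hc.2.1⟩ hn
          · exact ⟨u, hu, hc⟩

theorem alt_true_iff (w : String) (ts : List String) :
    is_probable_transliteration_alt w ts = true ↔
      ∃ t ∈ ts, pvKey t.toList = pvKey w.toList := by
  simp only [is_probable_transliteration_alt, PySem.Set.contains,
    List.contains_eq_mem, decide_eq_true_eq, PySem.Set.mem_ofList, List.mem_map]

-- ===== VERDICT (by name: the statement is the Claim_ definition above) =====
theorem is_probable_transliteration_spec : Claim_equal_is_probable_transliteration := by
  intro w ts _
  unfold Spec_is_probable_transliteration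
  rw [Bool.eq_iff_iff, alt_true_iff]
  set e := PySem.Chars.lower w.toList with he
  have hekey : pvKey w.toList = pvKey e := by
    rw [he]; simp only [pvKey, lower_idem]
  have hkey : ∀ t : String, (pvKey t.toList = pvKey w.toList ↔
      (e = PySem.Chars.lower t.toList ∨
       (4 ≤ e.length ∧ 4 ≤ (PySem.Chars.lower t.toList).length ∧
        e.take 4 = (PySem.Chars.lower t.toList).take 4))) := by
    intro t
    have hkt : pvKey t.toList = pvKey (PySem.Chars.lower t.toList) := by
      simp only [pvKey, lower_idem]
    rw [hekey, hkt, eq_comm,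
      key_eq_iff e (PySem.Chars.lower t.toList) (by rw [he, lower_idem]) (lower_idem _)]
  simp only [is_probable_transliteration, ← he]
  by_cases h1 : (ts.map String.toList).contains e = true
  · have hA : ∃ t ∈ ts, pvKey t.toList = pvKey w.toList := by
      rw [List.contains_eq_mem, decide_eq_true_eq, List.mem_map] at h1
      obtain ⟨t, ht, hteq⟩ := h1
      refine ⟨t, ht, (hkey t).mpr (Or.inl ?_)⟩
      rw [hteq, he, lower_idem]
    have hEx : ∃ a ∈ ts, a.toList = e := by simpa using h1
    simp [hA, hEx]
  · simp only [if_neg h1, pvALoop_true_iff]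
    constructor
    · rintro ⟨t, ht, hc⟩; exact ⟨t, ht, (hkey t).mpr hc⟩
    · rintro ⟨t, ht, hc⟩; exact ⟨t, ht, (hkey t).mp hc⟩
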